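-- pv_equiv track=rewrite | github.com/kupl/qsyn | qsyn/util/utils.py | into_n_partitions
-- ===== SOURCE A (Python) =====
-- import itertools
-- from typing import Union, List, Tuple, Dict, Set
--
-- def into_n_partitions(li : List, n : int):
--     # generate & check based :(
--     to_return = list()
--     choices_of_li = [ x for i in range(0, len(li) +1) for x in itertools.combinations(li, r = i) ]
--
--
--     for y in itertools.product(choices_of_li, repeat= n) :
--         flattened = list()
--         for x in y:
--             flattened+=list(x)
--         if set(flattened) == set(li) and len(flattened) == len(li):
--             to_return.append(y)
--     return to_return
-- ===== SOURCE B (Python) =====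
-- import itertools
--
-- def into_n_partitions(li, n):
--     # Build partitions directly, one part per round: a state is (parts chosen so
--     # far, elements still to distribute); each round extends every state by one
--     # combination of its remaining elements.  No n-fold product, no filtering of
--     # a generate-everything pool, and no recursion.
--     if n < 0:
--         return []
--     if not li:
--         return [((),) * n]  # no elements: the unique partition is n empty parts
--     states = [((), list(li))]
--     for _ in range(n):
--         new = []
--         for parts, rest in states:
--             for i in range(len(rest) + 1):
--                 for head in itertools.combinations(rest, i):
--                     new.append((parts + (head,), [x for x in rest if x not in head]))
--         states = new
--     return [parts for parts, rest in states if not rest]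
-- ===== Notes on version B (the rewrite author's own statement) =====
-- stated objective: faster
-- what changed: A enumerates the full n-fold product of all 2^len subsets and filters by a set/length check; B builds only consistent partial partitions, extending (parts, remaining-elements) states one part per round, so nothing is generated and discarded.
-- outside the precondition, e.g. on into_n_partitions([1, 1], 1): A returns [((1, 1),)], B returns [((1,),), ((1,),), ((1, 1),)]
import Mathlib
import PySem

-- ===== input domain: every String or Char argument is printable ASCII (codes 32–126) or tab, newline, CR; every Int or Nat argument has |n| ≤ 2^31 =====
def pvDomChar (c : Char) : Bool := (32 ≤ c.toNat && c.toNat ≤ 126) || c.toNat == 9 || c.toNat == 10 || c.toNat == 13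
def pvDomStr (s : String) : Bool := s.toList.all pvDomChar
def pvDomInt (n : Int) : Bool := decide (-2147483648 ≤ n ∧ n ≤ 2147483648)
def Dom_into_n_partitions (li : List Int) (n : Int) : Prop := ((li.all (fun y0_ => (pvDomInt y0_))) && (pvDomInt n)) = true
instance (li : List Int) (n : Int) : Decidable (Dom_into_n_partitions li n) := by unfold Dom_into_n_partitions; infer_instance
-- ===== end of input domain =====

-- B builds each partition directly, one part per round over (parts, remaining)
-- states, instead of A's filter over the n-fold product of all subsets;
-- equivalence is proved on duplicate-free lists with n ≥ 0 (see Pre_).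

-- ===== PORT A =====
-- itertools.combinations li k, in itertools order (by index, lexicographic)
def pyCombos : List Int → Nat → List (List Int)
  | _, 0 => [[]]
  | [], _ + 1 => []
  | x :: xs, k + 1 => (pyCombos xs k).map (x :: ·) ++ pyCombos xs (k + 1)

-- [ x for i in range(0, len(li)+1) for x in itertools.combinations(li, r=i) ]
def choicesOfLi (li : List Int) : List (List Int) :=
  (List.range (li.length + 1)).flatMap (fun i => pyCombos li i)

-- itertools.product(cs, repeat=k), leftmost component varying slowest
def pyProductRep (cs : List (List Int)) : Nat → List (List (List Int))
  | 0 => [[]]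
  | k + 1 => cs.flatMap (fun c => (pyProductRep cs k).map (c :: ·))

-- the inner loop: flattened = []; for x in y: flattened += list(x)
def flatConcat (y : List (List Int)) : List Int := y.foldl (fun f x => f ++ x) []

-- set(flattened) == set(li) and len(flattened) == len(li)
def validCheck (li : List Int) (y : List (List Int)) : Bool :=
  PySem.Set.equal (PySem.Set.ofList (flatConcat y)) (PySem.Set.ofList li)
    && (flatConcat y).length == li.length

def into_n_partitions (li : List Int) (n : Int) : List (List (List Int)) :=
  -- n.toNat: itertools.product raises ValueError for repeat < 0 (excluded by Pre_)
  (pyProductRep (choicesOfLi li) n.toNat).foldl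
    (fun acc y => if validCheck li y then acc ++ [y] else acc) []

-- ===== PORT B =====
-- one round: extend every state (parts so far, remaining elements) by one part
def altStep (states : List (List (List Int) × List Int)) :
    List (List (List Int) × List Int) :=
  states.flatMap (fun s =>
    (List.range (s.2.length + 1)).flatMap (fun i =>
      (pyCombos s.2 i).flatMap (fun head =>
        [(s.1 ++ [head], s.2.filter (fun x => !head.contains x))])))

def into_n_partitions_alt (li : List Int) (n : Int) : List (List (List Int)) :=
  if n < 0 then []
  else if li.isEmpty then [List.replicate n.toNat []]
  else
    -- 'for _ in range(n): states = new' = n-fold iteration of altStep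
    ((altStep^[n.toNat] [([], li)]).filter (fun s => s.2.isEmpty)).map (·.1)

-- ===== PRECONDITION & SPEC =====
-- Pre_ excludes n < 0, where A raises ValueError (itertools.product rejects a negative
-- repeat), and lists with duplicate elements, where A's set-based check accepts
-- position-overlapping selections with accidental multiplicities — a corner neither
-- behaviour of which is canonical (both programs return, with different values).
def Pre_into_n_partitions (li : List Int) (n : Int) : Prop := li.Nodup ∧ 0 ≤ n
instance (li : List Int) (n : Int) : Decidable (Pre_into_n_partitions li n) := by
  unfold Pre_into_n_partitions; infer_instance

def pvWitness_into_n_partitions : List Int × Int := ([1, 2, 3], 2)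

def Spec_into_n_partitions (li : List Int) (n : Int) (out : List (List (List Int))) : Prop := out = into_n_partitions_alt li n
instance (li : List Int) (n : Int) (out : List (List (List Int))) : Decidable (Spec_into_n_partitions li n out) := by unfold Spec_into_n_partitions; infer_instance

-- ===== CLAIM (what is proved, stated in full; the proofs are below) =====
def Claim_equal_into_n_partitions : Prop := ∀ (li : List Int) (n : Int), Dom_into_n_partitions li n → Pre_into_n_partitions li n → Spec_into_n_partitions li n (into_n_partitions li n)

-- ===== LEMMAS AND PROOFS =====

-- proof-side depth-first form of B's round-by-round construction: dfsGo k rem =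
-- all ordered k-partitions of rem (first part = a combination, then recurse)
def dfsGo : Nat → List Int → List (List (List Int))
  | 0, rest => if rest.isEmpty then [[]] else []
  | k + 1, rest =>
      (List.range (rest.length + 1)).flatMap (fun i =>
        (pyCombos rest i).flatMap (fun head =>
          (dfsGo k (rest.filter (fun x => !head.contains x))).map (head :: ·)))

-- every combination is a sublist of its source
theorem mem_pyCombos_sublist : ∀ (li : List Int) (k : Nat) (c : List Int),
    c ∈ pyCombos li k → c.Sublist li := by
  intro li
  induction li with
  | nil =>
    intro k c hc
    cases k with
    | zero => simp [pyCombos] at hc; simp [hc]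
    | succ k => simp [pyCombos] at hc
  | cons a xs ih =>
    intro k c hc
    cases k with
    | zero => simp [pyCombos] at hc; simp [hc]
    | succ k =>
      simp only [pyCombos, List.mem_append, List.mem_map] at hc
      rcases hc with ⟨c', hc', rfl⟩ | hc
      · exact (ih k c' hc').cons₂ a
      · exact (ih (k + 1) c hc).cons a

theorem mem_choicesOfLi_sublist (li c : List Int) (hc : c ∈ choicesOfLi li) : c.Sublist li := by
  unfold choicesOfLi at hc
  simp only [List.mem_flatMap, List.mem_range] at hc
  obtain ⟨i, _, hci⟩ := hc
  exact mem_pyCombos_sublist li i c hci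

-- combinations of more than length-many elements do not exist
theorem pyCombos_eq_nil : ∀ (li : List Int) (k : Nat), li.length < k → pyCombos li k = [] := by
  intro li
  induction li with
  | nil =>
    intro k hk
    cases k with
    | zero => omega
    | succ k => rfl
  | cons a xs ih =>
    intro k hk
    cases k with
    | zero => omega
    | succ k =>
      simp only [pyCombos]
      rw [ih k (by simp at hk; omega), ih (k + 1) (by simp at hk; omega)]
      simp

-- flattening starting from an accumulator
theorem foldl_append_acc : ∀ (y : List (List Int)) (a : List Int),
    y.foldl (fun f x => f ++ x) a = a ++ y.foldl (fun f x => f ++ x) [] := by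
  intro y
  induction y with
  | nil => simp
  | cons c y ih =>
    intro a
    simp only [List.foldl_cons]
    rw [ih (a ++ c), ih ([] ++ c)]
    simp

theorem flatConcat_cons (c : List Int) (y : List (List Int)) :
    flatConcat (c :: y) = c ++ flatConcat y := by
  simp only [flatConcat, List.foldl_cons]
  simpa using foldl_append_acc y c

-- the guard of A's loop characterised as a permutation (rem duplicate-free)
theorem validCheck_iff_perm (rem : List Int) (y : List (List Int)) (hrem : rem.Nodup) :
    validCheck rem y = true ↔ (flatConcat y).Perm rem := by
  unfold validCheck
  rw [Bool.and_eq_true, PySem.Set.equal_iff, beq_iff_eq]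
  constructor
  · rintro ⟨hmem, hlen⟩
    have hmem' : ∀ x, x ∈ flatConcat y ↔ x ∈ rem := by
      intro x
      have := hmem x
      simpa [PySem.Set.mem_ofList] using this
    have hd : (flatConcat y).dedup.Perm rem :=
      (List.perm_ext_iff_of_nodup ((flatConcat y).nodup_dedup) hrem).2
        (by intro a; rw [List.mem_dedup]; exact hmem' a)
    have hlen' : (flatConcat y).dedup.length = (flatConcat y).length := by
      rw [hd.length_eq, hlen]
    have hded : (flatConcat y).dedup = flatConcat y :=
      ((flatConcat y).dedup_sublist).eq_of_length hlen'
    rwa [hded] at hd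
  · intro hp
    refine ⟨fun x => ?_, hp.length_eq⟩
    simp [PySem.Set.mem_ofList, hp.mem_iff]

-- filtering A's combination pool down to the elements of a sub-universe rem
-- gives exactly the combinations of rem, in the same order
theorem filter_pyCombos : ∀ (li rem : List Int) (k : Nat), li.Nodup → rem.Sublist li →
    (pyCombos li k).filter (fun c => decide (∀ x ∈ c, x ∈ rem)) = pyCombos rem k := by
  intro li
  induction li with
  | nil =>
    intro rem k _ hsub
    have h0 : rem = [] := List.sublist_nil.mp hsub
    subst h0
    cases k with
    | zero => simp [pyCombos]
    | succ k => simp [pyCombos]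
  | cons a xs ih =>
    intro rem k hnd hsub
    have hax : a ∉ xs := (List.nodup_cons.mp hnd).1
    have hndxs : xs.Nodup := (List.nodup_cons.mp hnd).2
    cases k with
    | zero => simp [pyCombos]
    | succ k =>
      cases hsub with
      | cons _ h =>
        -- rem <+ xs : a ∉ rem, the (a :: ·) block dies, recurse on the rest
        have haR : a ∉ rem := fun hmem => hax (h.mem hmem)
        simp only [pyCombos, List.filter_append, List.filter_map]
        have h1 : (pyCombos xs k).filter
            ((fun c => decide (∀ x ∈ c, x ∈ rem)) ∘ (a :: ·)) = [] := by
          apply List.eq_nil_iff_forall_not_mem.mpr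
          intro c hc
          rcases List.mem_filter.mp hc with ⟨_, hp⟩
          simp at hp
          exact absurd hp.1 haR
        rw [h1, ih rem (k + 1) hndxs h]
        simp
      | cons₂ _ h =>
        rename_i rem'
        -- rem = a :: rem'
        have harem : rem'.Sublist xs := h
        simp only [pyCombos, List.filter_append, List.filter_map]
        have h1 : (pyCombos xs k).filter
            ((fun c => decide (∀ x ∈ c, x ∈ a :: rem')) ∘ (a :: ·)) =
            (pyCombos xs k).filter (fun c => decide (∀ x ∈ c, x ∈ rem')) := by
          apply List.filter_congr
          intro c hc
          have hac : a ∉ c := fun hmem => hax ((mem_pyCombos_sublist xs k c hc).mem hmem)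
          simp only [Function.comp, decide_eq_decide]
          constructor
          · intro hp x hx
            rcases List.mem_cons.mp (hp x (List.mem_cons_of_mem a hx)) with rfl | h'
            · exact absurd hx hac
            · exact h'
          · intro hp x hx
            rcases List.mem_cons.mp hx with rfl | hx'
            · exact List.mem_cons_self
            · exact List.mem_cons_of_mem a (hp x hx')
        have h2 : (pyCombos xs (k + 1)).filter (fun c => decide (∀ x ∈ c, x ∈ a :: rem')) =
            (pyCombos xs (k + 1)).filter (fun c => decide (∀ x ∈ c, x ∈ rem')) := by
          apply List.filter_congr
          intro c hc
          have hac : a ∉ c := fun hmem => hax ((mem_pyCombos_sublist xs (k + 1) c hc).mem hmem)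
          simp only [decide_eq_decide]
          constructor
          · intro hp x hx
            rcases List.mem_cons.mp (hp x hx) with rfl | h'
            · exact absurd hx hac
            · exact h'
          · intro hp x hx
            exact List.mem_cons_of_mem a (hp x hx)
        rw [h1, h2, ih rem' k hndxs harem, ih rem' (k + 1) hndxs harem]

-- the same for the whole pool (all sizes)
theorem filter_choicesOfLi (li rem : List Int) (hnd : li.Nodup) (hsub : rem.Sublist li) :
    (choicesOfLi li).filter (fun c => decide (∀ x ∈ c, x ∈ rem)) = choicesOfLi rem := by
  unfold choicesOfLi
  rw [List.filter_flatMap]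
  have hlen : rem.length ≤ li.length := hsub.length_le
  obtain ⟨d, hd⟩ : ∃ d, li.length + 1 = (rem.length + 1) + d := ⟨li.length - rem.length, by omega⟩
  rw [hd, List.range_add, List.flatMap_append]
  have h1 : (List.range (rem.length + 1)).flatMap
      (fun i => (pyCombos li i).filter (fun c => decide (∀ x ∈ c, x ∈ rem))) =
      (List.range (rem.length + 1)).flatMap (fun i => pyCombos rem i) :=
    List.flatMap_congr (fun i _ => filter_pyCombos li rem i hnd hsub)
  have h2 : ((List.range d).map (fun x => rem.length + 1 + x)).flatMap
      (fun i => (pyCombos li i).filter (fun c => decide (∀ x ∈ c, x ∈ rem))) = [] := by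
    apply List.flatMap_eq_nil_iff.mpr
    intro i hi
    simp only [List.mem_map] at hi
    obtain ⟨j, _, rfl⟩ := hi
    rw [filter_pyCombos li rem _ hnd hsub]
    exact pyCombos_eq_nil rem _ (by omega)
  rw [h1, h2, List.append_nil]

-- a duplicate-free rem splits as any sub-combination c followed by what c leaves
theorem perm_cons_filter (rem c : List Int) (hrem : rem.Nodup) (hc : c.Nodup)
    (hsub : ∀ x ∈ c, x ∈ rem) :
    rem.Perm (c ++ rem.filter (fun x => !c.contains x)) := by
  have h1 : (rem.filter (fun x => c.contains x)).Perm c := by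
    refine (List.perm_ext_iff_of_nodup (hrem.filter _) hc).2 ?_
    intro x
    simp only [List.mem_filter, List.contains_iff_mem]
    exact ⟨fun hh => hh.2, fun hh => ⟨hsub x hh, hh⟩⟩
  exact ((List.filter_append_perm (fun x => c.contains x) rem).symm).trans (h1.append_right _)

-- guarded flatMap over a pool = flatMap over the filtered pool
theorem flatMap_if_eq_filter_flatMap (l : List (List Int)) (p : List Int → Prop)
    [DecidablePred p] (F : List Int → List (List (List Int))) :
    (l.flatMap (fun c => if p c then F c else [])) =
      (l.filter (fun c => decide (p c))).flatMap F := by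
  induction l with
  | nil => rfl
  | cons c l ih =>
    by_cases hp : p c
    · simp [hp, ih]
    · simp [hp, ih]

-- the degenerate universe: the only k-partition of [] is k empty parts
theorem dfsGo_nil : ∀ k : Nat, dfsGo k [] = [List.replicate k []] := by
  intro k
  induction k with
  | zero => simp [dfsGo]
  | succ k ih => simp [dfsGo, pyCombos, ih, List.replicate_succ]

-- MAIN: filtering the n-fold product of li's combination pool by A's guard for a
-- duplicate-free sub-universe rem is exactly B's direct recursion on rem
theorem filter_product_eq_dfsGo : ∀ (k : Nat) (li rem : List Int), li.Nodup → rem.Sublist li →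
    (pyProductRep (choicesOfLi li) k).filter (fun y => validCheck rem y) = dfsGo k rem := by
  intro k
  induction k with
  | zero =>
    intro li rem hnd hsub
    have hrem : rem.Nodup := hnd.sublist hsub
    simp only [pyProductRep, dfsGo]
    by_cases h : rem = []
    · subst h
      have hv : validCheck [] [] = true :=
        (validCheck_iff_perm [] [] (by simp)).2 (by simp [flatConcat])
      simp [List.filter, hv]
    · have hv : validCheck rem [] = false := by
        rw [Bool.eq_false_iff]
        intro hvt
        exact h (List.nil_perm.mp ((validCheck_iff_perm rem [] hrem).1 hvt))
      have hne : rem.isEmpty = false := by simpa using h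
      simp [List.filter, hv, hne]
  | succ k ih =>
    intro li rem hnd hsub
    have hrem : rem.Nodup := hnd.sublist hsub
    simp only [pyProductRep]
    rw [List.filter_flatMap]
    have hstep : ∀ c ∈ choicesOfLi li,
        ((pyProductRep (choicesOfLi li) k).map (c :: ·)).filter (fun y => validCheck rem y) =
          if ∀ x ∈ c, x ∈ rem then
            (dfsGo k (rem.filter (fun x => !c.contains x))).map (c :: ·)
          else [] := by
      intro c hc
      have hcsub : c.Sublist li := mem_choicesOfLi_sublist li c hc
      have hcnd : c.Nodup := hnd.sublist hcsub
      rw [List.filter_map]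
      by_cases hcr : ∀ x ∈ c, x ∈ rem
      · rw [if_pos hcr]
        have hrs : (rem.filter (fun x => !c.contains x)).Sublist li :=
          (rem.filter_sublist).trans hsub
        have hperm : rem.Perm (c ++ rem.filter (fun x => !c.contains x)) :=
          perm_cons_filter rem c hrem hcnd hcr
        have hval : ∀ y ∈ pyProductRep (choicesOfLi li) k,
            ((fun y => validCheck rem y) ∘ (c :: ·)) y =
              validCheck (rem.filter (fun x => !c.contains x)) y := by
          intro y _
          have hnd' : (rem.filter (fun x => !c.contains x)).Nodup := hrem.filter _
          apply Bool.coe_iff_coe.mp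
          simp only [Function.comp_apply]
          rw [validCheck_iff_perm rem (c :: y) hrem,
              validCheck_iff_perm _ y hnd', flatConcat_cons]
          constructor
          · intro hp
            exact (List.perm_append_left_iff c).mp (hp.trans hperm)
          · intro hp
            exact ((List.perm_append_left_iff c).mpr hp).trans hperm.symm
        rw [List.filter_congr hval, ih li _ hnd hrs]
      · rw [if_neg hcr]
        have hempty : (pyProductRep (choicesOfLi li) k).filter
            ((fun y => validCheck rem y) ∘ (c :: ·)) = [] := by
          apply List.eq_nil_iff_forall_not_mem.mpr
          intro y hy
          rcases List.mem_filter.mp hy with ⟨_, hp⟩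
          simp only [Function.comp] at hp
          have hperm := (validCheck_iff_perm rem (c :: y) hrem).1 hp
          rw [flatConcat_cons] at hperm
          obtain ⟨x, hxc, hxr⟩ := not_forall₂.mp hcr
          exact hxr (hperm.mem_iff.mp (List.mem_append.mpr (Or.inl hxc)))
        rw [hempty]
        rfl
    rw [List.flatMap_congr hstep,
        flatMap_if_eq_filter_flatMap (choicesOfLi li) (fun c => ∀ x ∈ c, x ∈ rem)
          (fun c => (dfsGo k (rem.filter (fun x => !c.contains x))).map (c :: ·)),
        filter_choicesOfLi li rem hnd hsub]
    simp only [dfsGo, choicesOfLi, List.flatMap_assoc]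

-- a guarded singleton flatMap is a filter-then-map
theorem flatMap_if_singleton (l : List (List (List Int) × List Int))
    (p : List (List Int) × List Int → Bool)
    (f : List (List Int) × List Int → List (List Int)) :
    l.flatMap (fun s => if p s then [f s] else []) = (l.filter p).map f := by
  induction l with
  | nil => rfl
  | cons s l ih =>
    by_cases hp : p s
    · simp [hp, ih]
    · simp [hp, ih]

-- B's level-by-level iteration collects exactly the depth-first partitions,
-- each prefixed by its state's already chosen parts
theorem iterate_altStep_eq_dfsGo : ∀ (k : Nat) (states : List (List (List Int) × List Int)),
    ((altStep^[k] states).filter (fun s => s.2.isEmpty)).map (·.1) =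
      states.flatMap (fun s => (dfsGo k s.2).map (fun t => s.1 ++ t)) := by
  intro k
  induction k with
  | zero =>
    intro states
    rw [Function.iterate_zero_apply, ← flatMap_if_singleton states (fun s => s.2.isEmpty) (·.1)]
    apply List.flatMap_congr
    intro s _
    by_cases hs : s.2.isEmpty
    · simp [dfsGo, hs]
    · simp [dfsGo, hs]
  | succ k ih =>
    intro states
    rw [Function.iterate_succ_apply, ih (altStep states)]
    unfold altStep
    rw [List.flatMap_assoc]
    apply List.flatMap_congr
    intro s _
    rw [List.flatMap_assoc]
    simp only [dfsGo, List.map_flatMap]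
    apply List.flatMap_congr
    intro i _
    rw [List.flatMap_assoc]
    apply List.flatMap_congr
    intro head _
    simp only [List.flatMap_cons, List.flatMap_nil, List.append_nil, List.map_map]
    apply List.map_congr_left
    intro t _
    simp

-- ===== VERDICT (by name: the statement is the Claim_ definition above) =====
theorem into_n_partitions_spec : Claim_equal_into_n_partitions := by
  intro li n _ hpre
  unfold Spec_into_n_partitions into_n_partitions into_n_partitions_alt
  rw [if_neg (not_lt.mpr hpre.2), PySem.List.foldl_append_if_eq_filter, List.nil_append,
      filter_product_eq_dfsGo n.toNat li li hpre.1 (List.Sublist.refl li)]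
  by_cases hli : li.isEmpty
  · rw [if_pos hli, List.isEmpty_iff.mp hli, dfsGo_nil]
  · rw [if_neg hli, iterate_altStep_eq_dfsGo n.toNat [([], li)]]
    simp
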